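-- pv_equiv track=rewrite | github.com/dx0o0/DataQualityGroup-MTSClean | constraint_mining_algorithms/tsdd/linear.py | all_masks
-- ===== SOURCE A (Python) =====
-- import itertools
--
-- def all_masks(vec_len, max_x):
--     """
--     生成长度为vec_len的所有可能的01掩码串
--     :param vec_len: 生成的掩码长度
--     :param max_x: 掩码中为1的最大位数，限制约束的复杂程度
--     :return: 长度为vec_len的所有01掩码串
--     """
--     masks = set()
--     masks_with_one = [''.join(item) for item in itertools.product("01", repeat=max_x)]   # 生成长度为max_x的01全排列
--     masks_with_one.pop(0)    # 删除全0的排列项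
--     for i in range(vec_len - max_x):
--         for with_one in masks_with_one:
--             mask = '0' * i + with_one + '0' * (vec_len - max_x - i)
--             masks.add(mask)
--     return masks
-- ===== SOURCE B (Python) =====
-- import itertools
--
--
-- def all_masks(vec_len, max_x):
--     """Same masks as A, but each mask is generated exactly once (keyed by the
--     position of its last '1'), so no duplicate work is done: the window is
--     anchored so that its last cell holds the mask's last '1' (or the window
--     sits at offset 0 for masks whose ones all fit in the first max_x cells)."""
--     zeros = vec_len - max_x
--     out = set()
--     if zeros <= 0 or max_x <= 0:
--         return out
--     # every non-zero pattern of length max_x, placed at offset 0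
--     head_pats = [''.join(t) for t in itertools.product("01", repeat=max_x)][1:]
--     for p in head_pats:
--         out.add(p + '0' * zeros)
--     # patterns ending in '1', placed at offsets 1 .. zeros-1
--     tail_pats = [''.join(t) + '1' for t in itertools.product("01", repeat=max_x - 1)]
--     for i in range(1, zeros):
--         suffix = '0' * (zeros - i)
--         for p in tail_pats:
--             out.add('0' * i + p + suffix)
--     return out
-- ===== Notes on version B (the rewrite author's own statement) =====
-- stated objective: alternative
-- what changed: A places every non-zero length-max_x pattern at every window offset and deduplicates through the set; B generates each mask exactly once (anchoring the window so its last cell holds the mask's last '1', or at offset 0), so no duplicate candidates are built and no set-membership dedup is needed.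
import Mathlib
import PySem

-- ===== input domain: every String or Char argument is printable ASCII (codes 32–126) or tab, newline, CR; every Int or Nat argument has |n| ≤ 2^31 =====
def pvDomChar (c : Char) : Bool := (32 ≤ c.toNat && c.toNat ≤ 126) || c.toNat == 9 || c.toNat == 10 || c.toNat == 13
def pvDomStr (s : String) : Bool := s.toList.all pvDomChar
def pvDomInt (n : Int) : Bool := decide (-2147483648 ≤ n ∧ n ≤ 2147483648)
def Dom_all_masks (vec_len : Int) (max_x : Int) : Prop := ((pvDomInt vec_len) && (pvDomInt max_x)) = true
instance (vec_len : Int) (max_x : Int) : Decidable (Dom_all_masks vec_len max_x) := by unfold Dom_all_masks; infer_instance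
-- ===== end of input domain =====

-- B generates each mask exactly once (anchored at its last '1', or at offset 0) instead of
-- placing every pattern at every offset and deduplicating through the set.

-- ===== PORT A =====
-- itertools.product("01", repeat=m), ported by hand (exact: the first coordinate varies slowest)
def pats01 : Nat → List (List Char)
  | 0 => [[]]
  | m + 1 => (pats01 m).map (fun t => '0' :: t) ++ (pats01 m).map (fun t => '1' :: t)

def all_masks (vec_len : Int) (max_x : Int) : List String :=
  -- masks_with_one = [''.join(item) for item in itertools.product("01", repeat=max_x)]
  let masksWithOne : List String := (pats01 max_x.toNat).map String.ofList
  -- masks_with_one.pop(0)  (never raises: the product list has 2^max_x ≥ 1 elements)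
  let masksWithOne := masksWithOne.drop 1
  -- for i in range(vec_len - max_x): for with_one in masks_with_one:
  --     masks.add('0' * i + with_one + '0' * (vec_len - max_x - i))
  -- ('0' * k = List.replicate k.toNat '0': Python yields '' for k ≤ 0, as toNat does;
  --  string concatenation is exact on the character lists)
  (PySem.List.pyRange 0 (vec_len - max_x) 1).foldl
    (fun masks i => masksWithOne.foldl
      (fun masks w => PySem.Set.add masks
        (String.ofList (List.replicate i.toNat '0' ++ w.toList ++
                        List.replicate (vec_len - max_x - i).toNat '0'))) masks)
    PySem.Set.empty

-- ===== PORT B =====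
def all_masks_alt (vec_len : Int) (max_x : Int) : List String :=
  -- zeros = vec_len - max_x; head_pats, tail_pats and the first loop's result are inlined
  -- into the second loop's initial accumulator (Source B binds them to locals)
  if vec_len - max_x ≤ 0 ∨ max_x ≤ 0 then PySem.Set.empty else
  -- for i in range(1, zeros): suffix = '0' * (zeros - i)
  --   for p in tail_pats: out.add('0' * i + p + suffix)
  -- where tail_pats = [''.join(t) + '1' for t in itertools.product("01", repeat=max_x - 1)]
  (PySem.List.pyRange 1 (vec_len - max_x) 1).foldl
    (fun out i => ((pats01 (max_x - 1).toNat).map (fun t => String.ofList (t ++ ['1']))).foldl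
      (fun out p => PySem.Set.add out
        (String.ofList (List.replicate i.toNat '0' ++ p.toList ++
                        List.replicate (vec_len - max_x - i).toNat '0'))) out)
    -- out after the first loop: for p in head_pats: out.add(p + '0' * zeros)
    -- where head_pats = [''.join(t) for t in itertools.product("01", repeat=max_x)][1:]
    ((((pats01 max_x.toNat).map String.ofList).drop 1).foldl
      (fun out p => PySem.Set.add out
        (String.ofList (p.toList ++ List.replicate (vec_len - max_x).toNat '0')))
      PySem.Set.empty)

-- ===== PRECONDITION & SPEC =====
-- Pre_ excludes exactly max_x < 0, where A raises ValueError (negative repeat); A returns on everything else.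
def Pre_all_masks (vec_len : Int) (max_x : Int) : Prop := 0 ≤ max_x
instance (vec_len : Int) (max_x : Int) : Decidable (Pre_all_masks vec_len max_x) := by
  unfold Pre_all_masks; infer_instance
def pvWitness_all_masks : Int × Int := (4, 2)

def Spec_all_masks (vec_len : Int) (max_x : Int) (out : List String) : Prop := out = all_masks_alt vec_len max_x
instance (vec_len : Int) (max_x : Int) (out : List String) : Decidable (Spec_all_masks vec_len max_x out) := by unfold Spec_all_masks; infer_instance

-- ===== CLAIM (what is proved, stated in full; the proofs are below) =====
def Claim_equal_all_masks : Prop := ∀ (vec_len : Int) (max_x : Int), Dom_all_masks vec_len max_x → Pre_all_masks vec_len max_x → Spec_all_masks vec_len max_x (all_masks vec_len max_x)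

-- ===== LEMMAS AND PROOFS =====

-- proof-side abbreviations (Nat world)
def zeroP (m : Nat) : List Char := List.replicate m '0'
def drop1 (m : Nat) : List (List Char) := (pats01 m).drop 1
def tailP (m : Nat) : List (List Char) := (pats01 (m - 1)).map (fun t => t ++ ['1'])
def lastIs1 (w : List Char) : Bool := w.getLastD '0' == '1'
def maskL (n k : Nat) (w : List Char) : List Char :=
  List.replicate k '0' ++ w ++ List.replicate (n - k) '0'
def gmask (n k : Nat) (w : List Char) : String := String.ofList (maskL n k w)
def blockB (n m k : Nat) : List String :=
  if k = 0 then (drop1 m).map (gmask n 0) else (tailP m).map (gmask n k)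
def Bpre (n m K : Nat) : List String := (List.range K).flatMap (blockB n m)
def stepA (n m : Nat) (s : PySem.Set String) (k : Nat) : PySem.Set String :=
  (drop1 m).foldl (fun s w => PySem.Set.add s (gmask n k w)) s
def stepT (n m : Nat) (s : PySem.Set String) (k : Nat) : PySem.Set String :=
  (tailP m).foldl (fun s w => PySem.Set.add s (gmask n k w)) s

lemma pats01_succ (m : Nat) :
    pats01 (m + 1) = (pats01 m).map (fun t => '0' :: t) ++ (pats01 m).map (fun t => '1' :: t) := rfl

lemma mem_pats01 {m : Nat} {w : List Char} :
    w ∈ pats01 m ↔ w.length = m ∧ ∀ c ∈ w, c = '0' ∨ c = '1' := by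
  induction m generalizing w with
  | zero =>
    simp only [pats01, List.mem_singleton]
    constructor
    · rintro rfl; simp
    · rintro ⟨h, _⟩; exact List.eq_nil_of_length_eq_zero h
  | succ m ih =>
    constructor
    · intro hw
      rw [pats01_succ] at hw
      have hcase : (∃ t ∈ pats01 m, '0' :: t = w) ∨ (∃ t ∈ pats01 m, '1' :: t = w) := by
        rcases List.mem_append.mp hw with h | h
        · exact Or.inl (by simpa using List.mem_map.mp h)
        · exact Or.inr (by simpa using List.mem_map.mp h)
      rcases hcase with ⟨t, ht, rfl⟩ | ⟨t, ht, rfl⟩ <;>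
        obtain ⟨hl, hc⟩ := ih.mp ht
      · exact ⟨by simp [hl], by
          intro c hcm
          rcases List.mem_cons.mp hcm with rfl | hm
          · exact Or.inl rfl
          · exact hc c hm⟩
      · exact ⟨by simp [hl], by
          intro c hcm
          rcases List.mem_cons.mp hcm with rfl | hm
          · exact Or.inr rfl
          · exact hc c hm⟩
    · rintro ⟨hl, hc⟩
      cases w with
      | nil => simp at hl
      | cons c t =>
        have hlt : t.length = m := by simpa using hl
        have hct : ∀ d ∈ t, d = '0' ∨ d = '1' := fun d hd => hc d (List.mem_cons_of_mem _ hd)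
        have htm : t ∈ pats01 m := ih.mpr ⟨hlt, hct⟩
        rw [pats01_succ]
        rcases hc c (List.mem_cons_self) with rfl | rfl
        · exact List.mem_append.mpr (Or.inl (List.mem_map.mpr ⟨t, htm, rfl⟩))
        · exact List.mem_append.mpr (Or.inr (List.mem_map.mpr ⟨t, htm, rfl⟩))

lemma len_of_mem_pats01 {m : Nat} {w : List Char} (h : w ∈ pats01 m) : w.length = m :=
  (mem_pats01.mp h).1

lemma pats01_head (m : Nat) : ∃ t, pats01 m = zeroP m :: t := by
  induction m with
  | zero => exact ⟨[], rfl⟩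
  | succ m ih =>
    obtain ⟨t, ht⟩ := ih
    refine ⟨t.map (fun t => '0' :: t) ++ (pats01 m).map (fun t => '1' :: t), ?_⟩
    rw [pats01_succ, ht]
    simp [zeroP, List.replicate_succ]

lemma pats01_eq (m : Nat) : pats01 m = zeroP m :: drop1 m := by
  obtain ⟨t, ht⟩ := pats01_head m
  rw [drop1, ht]
  simp

lemma pats01_nodup (m : Nat) : (pats01 m).Nodup := by
  induction m with
  | zero => simp [pats01]
  | succ m ih =>
    rw [pats01_succ]
    refine List.Nodup.append ?_ ?_ ?_
    · exact ih.map_on (fun x _ y _ h => by simpa using h)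
    · exact ih.map_on (fun x _ y _ h => by simpa using h)
    · rintro x hx hy
      obtain ⟨t, _, rfl⟩ := List.mem_map.mp hx
      obtain ⟨t', _, h⟩ := List.mem_map.mp hy
      simp at h

lemma drop1_nodup (m : Nat) : (drop1 m).Nodup := by
  have h := pats01_nodup m
  rw [pats01_eq m] at h
  exact (List.nodup_cons.mp h).2

lemma mem_drop1 {m : Nat} {w : List Char} :
    w ∈ drop1 m ↔ w ∈ pats01 m ∧ w ≠ zeroP m := by
  have h := pats01_nodup m
  rw [pats01_eq m] at h
  obtain ⟨hz, _⟩ := List.nodup_cons.mp h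
  constructor
  · intro hw
    refine ⟨by rw [pats01_eq]; exact List.mem_cons_of_mem _ hw, ?_⟩
    rintro rfl; exact hz hw
  · rintro ⟨hw, hne⟩
    rw [pats01_eq] at hw
    rcases List.mem_cons.mp hw with h' | h'
    · exact absurd h' hne
    · exact h'

lemma pos_of_mem_drop1 {m : Nat} {w : List Char} (h : w ∈ drop1 m) : 1 ≤ m := by
  cases m with
  | zero =>
    obtain ⟨hw, hne⟩ := mem_drop1.mp h
    have := len_of_mem_pats01 hw
    exact absurd (List.eq_nil_of_length_eq_zero this) (by simpa [zeroP] using hne)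
  | succ m => omega

lemma ends1 {m : Nat} {w : List Char} (hw : w ∈ pats01 m) (h : lastIs1 w = true) :
    ∃ u, w = u ++ ['1'] ∧ u.length + 1 = m := by
  obtain ⟨hl, hc⟩ := mem_pats01.mp hw
  rcases List.eq_nil_or_concat w with rfl | ⟨u, b, rfl⟩
  · simp [lastIs1] at h
  · rw [List.concat_eq_append] at *
    have hb : b = '1' := by
      have := h
      simp only [lastIs1, List.getLastD_concat] at this
      exact eq_of_beq this
    subst hb
    exact ⟨u, rfl, by simpa using hl⟩

lemma ends0 {m : Nat} {w : List Char} (hm : 1 ≤ m) (hw : w ∈ pats01 m) (h : lastIs1 w = false) :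
    ∃ q, w = q ++ ['0'] ∧ q.length + 1 = m := by
  obtain ⟨hl, hc⟩ := mem_pats01.mp hw
  rcases List.eq_nil_or_concat w with rfl | ⟨q, b, rfl⟩
  · simp at hl; omega
  · rw [List.concat_eq_append] at *
    have hb : b = '0' := by
      rcases hc b (by simp) with rfl | rfl
      · rfl
      · simp [lastIs1] at h
    subst hb
    exact ⟨q, rfl, by simpa using hl⟩

lemma shift_mem_drop1 {m : Nat} {q : List Char} (h : q ++ ['0'] ∈ drop1 m) :
    '0' :: q ∈ drop1 m := by
  obtain ⟨hw, hne⟩ := mem_drop1.mp h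
  obtain ⟨hl, hc⟩ := mem_pats01.mp hw
  refine mem_drop1.mpr ⟨mem_pats01.mpr ⟨by simpa using hl, ?_⟩, ?_⟩
  · intro c hcm
    rcases List.mem_cons.mp hcm with rfl | hm
    · exact Or.inl rfl
    · exact hc c (by simp [hm])
  · intro hzq
    apply hne
    rw [zeroP, List.eq_replicate_iff] at hzq ⊢
    obtain ⟨hzl, hza⟩ := hzq
    refine ⟨by simpa using hl, ?_⟩
    intro b hb
    rcases List.mem_append.mp hb with hb | hb
    · exact hza b (by simp [hb])
    · simpa using hb

lemma filter_pats01 (m : Nat) :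
    (pats01 (m + 1)).filter lastIs1 = (pats01 m).map (fun t => t ++ ['1']) := by
  induction m with
  | zero => decide
  | succ m ih =>
    rw [pats01_succ (m + 1), List.filter_append, List.filter_map, List.filter_map]
    have hcomp : ∀ c : Char,
        (pats01 (m + 1)).filter (lastIs1 ∘ (fun t => c :: t)) = (pats01 (m + 1)).filter lastIs1 := by
      intro c
      apply List.filter_congr
      intro w hw
      have hl : w.length = m + 1 := len_of_mem_pats01 hw
      rcases List.eq_nil_or_concat w with rfl | ⟨q, b, rfl⟩
      · simp at hl
      · simp only [Function.comp, lastIs1, List.concat_eq_append, ← List.cons_append,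
          List.getLastD_concat]
    rw [hcomp, hcomp, ih]
    conv_rhs => rw [pats01_succ m]
    simp [List.map_map, Function.comp_def, List.map_append]

lemma filter_drop1 {m : Nat} (hm : 1 ≤ m) :
    (drop1 m).filter lastIs1 = tailP m := by
  have h0 : lastIs1 (zeroP m) = false := by
    obtain ⟨k, rfl⟩ : ∃ k, m = k + 1 := ⟨m - 1, by omega⟩
    simp [lastIs1, zeroP, List.replicate_succ']
  have h := filter_pats01 (m - 1)
  have hm1 : m - 1 + 1 = m := by omega
  rw [hm1] at h
  rw [pats01_eq m, List.filter_cons, h0] at h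
  simpa [tailP] using h

lemma mask_shift {n k : Nat} (h : k + 1 ≤ n) (q : List Char) :
    maskL n (k + 1) (q ++ ['0']) = maskL n k ('0' :: q) := by
  unfold maskL
  have h2 : n - k = (n - (k + 1)) + 1 := by omega
  rw [h2, List.replicate_succ (n := n - (k+1)), List.replicate_succ' (n := k)]
  simp

lemma gmask_shift {n k : Nat} (h : k + 1 ≤ n) (q : List Char) :
    gmask n (k + 1) (q ++ ['0']) = gmask n k ('0' :: q) := by
  unfold gmask; rw [mask_shift h]

lemma gmask_inj {n k : Nat} {w w' : List Char} (hl : w.length = w'.length)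
    (h : gmask n k w = gmask n k w') : w = w' := by
  have h1 : maskL n k w = maskL n k w' := by
    have := congrArg String.toList h
    simpa [gmask] using this
  unfold maskL at h1
  have hlen : (List.replicate k '0' ++ w).length = (List.replicate k '0' ++ w').length := by
    simp [hl]
  have h2 := (List.append_inj h1 hlen).1
  exact List.append_cancel_left h2

lemma mask_ne {n m i k : Nat} {u w : List Char} (hik : i < k) (hk : k ≤ n)
    (hu : u.length + 1 = m) (hw : w.length = m) :
    gmask n k (u ++ ['1']) ≠ gmask n i w := by
  intro h
  have h' : maskL n k (u ++ ['1']) = maskL n i w := by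
    have := congrArg String.toList h
    simpa [gmask] using this
  have h1 : (maskL n k (u ++ ['1']))[k + m - 1]? = some '1' := by
    unfold maskL
    rw [List.getElem?_append_left (by simp; omega)]
    rw [List.getElem?_append_right (by simp; omega)]
    simp only [List.length_replicate]
    have e1 : k + m - 1 - k = m - 1 := by omega
    rw [e1, List.getElem?_append_right (by omega)]
    have e2 : m - 1 - u.length = 0 := by omega
    rw [e2]
    rfl
  have h2 : (maskL n i w)[k + m - 1]? = some '0' := by
    unfold maskL
    rw [List.getElem?_append_right (by simp; omega)]
    simp only [List.length_append, List.length_replicate, hw]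
    rw [List.getElem?_replicate, if_pos (by omega)]
  rw [h', h2] at h1
  simp at h1

lemma Bpre_succ (n m K : Nat) : Bpre n m (K + 1) = Bpre n m K ++ blockB n m K := by
  simp [Bpre, List.range_succ]

lemma mem_Bpre {n m K : Nat} : ∀ {i : Nat} {w : List Char}, i < K → K ≤ n → w ∈ drop1 m →
    gmask n i w ∈ Bpre n m K := by
  intro i
  induction i using Nat.strong_induction_on with
  | _ i ih =>
    intro w hiK hKn hw
    have hm : 1 ≤ m := pos_of_mem_drop1 hw
    cases i with
    | zero =>
      simp only [Bpre, List.mem_flatMap]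
      refine ⟨0, by simp; omega, ?_⟩
      simp only [blockB, if_pos]
      exact List.mem_map.mpr ⟨w, hw, rfl⟩
    | succ j =>
      obtain ⟨hwp, hwz⟩ := mem_drop1.mp hw
      cases hlw : lastIs1 w with
      | true =>
        obtain ⟨u, rfl, hu⟩ := ends1 hwp hlw
        simp only [Bpre, List.mem_flatMap]
        refine ⟨j + 1, by simp; omega, ?_⟩
        simp only [blockB, if_neg (Nat.succ_ne_zero j)]
        refine List.mem_map.mpr ⟨u ++ ['1'], ?_, rfl⟩
        refine List.mem_map.mpr ⟨u, ?_, rfl⟩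
        refine mem_pats01.mpr ⟨by omega, ?_⟩
        intro c hcm
        exact (mem_pats01.mp hwp).2 c (by simp [hcm])
      | false =>
        obtain ⟨q, rfl, hq⟩ := ends0 hm hwp hlw
        rw [gmask_shift (by omega)]
        exact ih j (by omega) (by omega) hKn (shift_mem_drop1 hw)

lemma mem_Bpre_shape {n m K : Nat} {x : String} (hm : 1 ≤ m) (hx : x ∈ Bpre n m K) :
    ∃ i w, i < K ∧ w.length = m ∧ x = gmask n i w := by
  simp only [Bpre, List.mem_flatMap] at hx
  obtain ⟨i, hi, hx⟩ := hx
  have hiK : i < K := by simpa using hi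
  unfold blockB at hx
  split at hx
  · obtain ⟨w, hw, rfl⟩ := List.mem_map.mp hx
    subst ‹i = 0›
    exact ⟨0, w, hiK, len_of_mem_pats01 (mem_drop1.mp hw).1, rfl⟩
  · obtain ⟨w, hw, rfl⟩ := List.mem_map.mp hx
    obtain ⟨t, ht, rfl⟩ := List.mem_map.mp hw
    refine ⟨i, t ++ ['1'], hiK, ?_, rfl⟩
    have := len_of_mem_pats01 ht
    simp [this]; omega

lemma not_mem_Bpre {n m k : Nat} {u : List Char} (hk : k ≤ n) (hu : u.length + 1 = m) :
    gmask n k (u ++ ['1']) ∉ Bpre n m k := by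
  intro hmem
  obtain ⟨i, w, hik, hwl, heq⟩ := mem_Bpre_shape (by omega) hmem
  exact mask_ne hik hk hu hwl heq

lemma blockA_nodup (n m k : Nat) : ((drop1 m).map (gmask n k)).Nodup := by
  refine (drop1_nodup m).map_on ?_
  intro x hx y hy h
  have hxl := len_of_mem_pats01 (mem_drop1.mp hx).1
  have hyl := len_of_mem_pats01 (mem_drop1.mp hy).1
  exact gmask_inj (by omega) h

lemma blockT_nodup (n m k : Nat) : ((tailP m).map (gmask n k)).Nodup := by
  have h1 : (tailP m).Nodup := by
    refine (pats01_nodup (m - 1)).map_on ?_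
    intro x _ y _ h
    simpa using h
  refine h1.map_on ?_
  intro x hx y hy h
  obtain ⟨tx, htx, rfl⟩ := List.mem_map.mp hx
  obtain ⟨ty, hty, rfl⟩ := List.mem_map.mp hy
  have h1 := len_of_mem_pats01 htx
  have h2 := len_of_mem_pats01 hty
  exact gmask_inj (by simp [h1, h2]) h

lemma stepA_eq {n m k : Nat} (hm : 1 ≤ m) (hkn : k < n) :
    stepA n m (Bpre n m k) k = Bpre n m (k + 1) := by
  unfold stepA
  rw [← PySem.Set.update_map_eq_foldl_add, PySem.Set.update_eq_append_filter,
      PySem.Set.ofList_eq_self_of_nodup _ (blockA_nodup n m k), List.filter_map]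
  rw [Bpre_succ]
  congr 1
  by_cases hk : k = 0
  · subst hk
    have hB0 : Bpre n m 0 = [] := by simp [Bpre]
    rw [hB0]
    have : (drop1 m).filter ((fun y => !(PySem.Set.contains ([] : PySem.Set String) y)) ∘ gmask n 0)
        = drop1 m := by
      apply List.filter_eq_self.mpr
      intro w _
      rfl
    rw [this]
    simp [blockB]
  · have hfil : (drop1 m).filter ((fun y => !(PySem.Set.contains (Bpre n m k) y)) ∘ gmask n k)
        = (drop1 m).filter lastIs1 := by
      apply List.filter_congr
      intro w hw
      obtain ⟨hwp, hwz⟩ := mem_drop1.mp hw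
      cases hlw : lastIs1 w with
      | true =>
        obtain ⟨u, rfl, hu⟩ := ends1 hwp hlw
        have hnm := not_mem_Bpre (n := n) (Nat.le_of_lt hkn) hu
        have hc : PySem.Set.contains (Bpre n m k) (gmask n k (u ++ ['1'])) = false := by
          cases hcon : PySem.Set.contains (Bpre n m k) (gmask n k (u ++ ['1']))
          · rfl
          · exact absurd ((PySem.Set.contains_iff _ _).mp hcon) hnm
        simp [Function.comp]
        exact hnm
      | false =>
        obtain ⟨q, rfl, hq⟩ := ends0 hm hwp hlw
        obtain ⟨j, rfl⟩ : ∃ j, k = j + 1 := ⟨k - 1, by omega⟩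
        have hmem : gmask n (j + 1) (q ++ ['0']) ∈ Bpre n m (j + 1) := by
          rw [gmask_shift (by omega)]
          exact mem_Bpre (by omega) (by omega) (shift_mem_drop1 hw)
        have hc := (PySem.Set.contains_iff (Bpre n m (j + 1)) (gmask n (j + 1) (q ++ ['0']))).mpr hmem
        simp [Function.comp]
        exact hmem
    rw [hfil, filter_drop1 hm]
    simp [blockB, hk]

lemma stepT_eq {n m k : Nat} (hm : 1 ≤ m) (hk1 : 1 ≤ k) (hkn : k < n) :
    stepT n m (Bpre n m k) k = Bpre n m (k + 1) := by
  unfold stepT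
  rw [← PySem.Set.update_map_eq_foldl_add]
  have hdisj : ∀ x ∈ (tailP m).map (gmask n k), x ∉ Bpre n m k := by
    intro x hx
    obtain ⟨w, hw, rfl⟩ := List.mem_map.mp hx
    obtain ⟨t, ht, rfl⟩ := List.mem_map.mp hw
    have htl := len_of_mem_pats01 ht
    exact not_mem_Bpre (Nat.le_of_lt hkn) (by omega)
  rw [PySem.Set.update_eq_append_of_disjoint _ _ (blockT_nodup n m k) hdisj]
  rw [Bpre_succ]
  congr 1
  have hkne : ¬ k = 0 := by omega
  simp [blockB, hkne]

lemma foldA {n m : Nat} (hm : 1 ≤ m) : ∀ K, K ≤ n →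
    (List.range K).foldl (stepA n m) [] = Bpre n m K := by
  intro K
  induction K with
  | zero => intro _; simp [Bpre]
  | succ K ih =>
    intro hK
    rw [List.range_succ, List.foldl_append, ih (by omega)]
    simpa using stepA_eq hm (by omega)

lemma foldT {n m : Nat} (hm : 1 ≤ m) : ∀ J, J ≤ n - 1 →
    (List.range J).foldl (fun s j => stepT n m s (j + 1)) (Bpre n m 1) = Bpre n m (J + 1) := by
  intro J
  induction J with
  | zero => intro _; simp
  | succ J ih =>
    intro hJ
    rw [List.range_succ, List.foldl_append, ih (by omega)]
    simpa using stepT_eq hm (by omega) (by omega)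

-- ===== VERDICT (by name: the statement is the Claim_ definition above) =====
theorem all_masks_spec : Claim_equal_all_masks := by
  intro v x _ hpre
  unfold Spec_all_masks all_masks all_masks_alt
  by_cases hZ : v - x ≤ 0
  · rw [PySem.List.pyRange_one_eq_nil (by omega), if_pos (Or.inl hZ)]
    rfl
  · by_cases hx : x ≤ 0
    · -- max_x = 0: A's pattern list is empty after the pop, so A adds nothing
      have hx0 : x = 0 := by unfold Pre_all_masks at hpre; omega
      subst hx0
      rw [if_pos (Or.inr le_rfl)]
      have hmw : ((pats01 (0 : Int).toNat).map String.ofList).drop 1 = [] := by rfl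
      simp only [hmw, List.foldl_nil]
      exact List.foldl_fixed _
    · -- main case: vec_len - max_x ≥ 1 and max_x ≥ 1
      have hxpos : 0 < x := by omega
      set Z := v - x with hZdef
      have hZpos : 0 < Z := by omega
      set n := Z.toNat with hn
      set m := x.toNat with hmdef
      have hm1 : 1 ≤ m := by omega
      have hn1 : 1 ≤ n := by omega
      have hZn : Z = (n : Int) := by omega
      have hxm : x = (m : Int) := by omega
      rw [if_neg (by omega)]
      -- A side
      have hA : (PySem.List.pyRange 0 Z 1).foldl
          (fun masks i => (((pats01 x.toNat).map String.ofList).drop 1).foldl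
            (fun masks w => PySem.Set.add masks
              (String.ofList (List.replicate i.toNat '0' ++ w.toList ++
                              List.replicate (Z - i).toNat '0'))) masks)
          PySem.Set.empty = Bpre n m n := by
        rw [PySem.List.pyRange_one, List.foldl_map]
        have hrange : (Z - 0).toNat = n := by omega
        rw [hrange]
        rw [PySem.List.foldl_congr_mem _ _ (stepA n m) _ ?_]
        · exact foldA hm1 n le_rfl
        · intro acc k hk
          have hk' : k < n := List.mem_range.mp hk
          have h1 : ((0 : Int) + (k : Int)).toNat = k := by omega
          have h2 : (Z - ((0 : Int) + (k : Int))).toNat = n - k := by omega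
          rw [h1, h2]
          unfold stepA
          have hdrop : ((pats01 x.toNat).map String.ofList).drop 1 = (drop1 m).map String.ofList := by
            rw [drop1, ← hmdef, List.map_drop]
          rw [hdrop, List.foldl_map]
          apply PySem.List.foldl_congr_mem
          intro acc' w _
          simp [gmask, maskL, String.toList_ofList]
      rw [hA]
      -- B side
      have hhead : (((pats01 x.toNat).map String.ofList).drop 1).foldl
          (fun out p => PySem.Set.add out
            (String.ofList (p.toList ++ List.replicate Z.toNat '0'))) PySem.Set.empty
          = Bpre n m 1 := by
        have hdrop : ((pats01 x.toNat).map String.ofList).drop 1 = (drop1 m).map String.ofList := by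
          rw [drop1, ← hmdef, List.map_drop]
        rw [hdrop, List.foldl_map]
        have h0 : (Bpre n m 0) = ([] : PySem.Set String) := by simp [Bpre]
        have hstep : stepA n m [] 0 = Bpre n m 1 := by
          have h' := stepA_eq (n := n) (m := m) (k := 0) hm1 (by omega)
          rw [h0] at h'
          simpa using h'
        rw [← hstep]
        unfold stepA
        apply PySem.List.foldl_congr_mem
        intro acc w _
        simp [gmask, maskL, String.toList_ofList, ← hn]
      rw [hhead]
      have hB : (PySem.List.pyRange 1 Z 1).foldl
          (fun out i => ((pats01 (x - 1).toNat).map (fun t => String.ofList (t ++ ['1']))).foldl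
            (fun out p => PySem.Set.add out
              (String.ofList (List.replicate i.toNat '0' ++ p.toList ++
                              List.replicate (Z - i).toNat '0'))) out)
          (Bpre n m 1) = Bpre n m ((n - 1) + 1) := by
        rw [PySem.List.pyRange_one, List.foldl_map]
        have hrange : (Z - 1).toNat = n - 1 := by omega
        rw [hrange]
        rw [PySem.List.foldl_congr_mem _ _ (fun s j => stepT n m s (j + 1)) _ ?_]
        · exact foldT hm1 (n - 1) le_rfl
        · intro acc j hj
          have hj' : j < n - 1 := List.mem_range.mp hj
          have h1 : ((1 : Int) + (j : Int)).toNat = j + 1 := by omega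
          have h2 : (Z - ((1 : Int) + (j : Int))).toNat = n - (j + 1) := by omega
          rw [h1, h2]
          unfold stepT
          have hx1 : (x - 1).toNat = m - 1 := by omega
          rw [hx1, tailP, List.foldl_map]
          show _ = List.foldl (fun s w => PySem.Set.add s (gmask n (j + 1) w)) acc
              (List.map (fun t => t ++ ['1']) (pats01 (m - 1)))
          rw [List.foldl_map]
          apply PySem.List.foldl_congr_mem
          intro acc' t _
          simp [gmask, maskL, String.toList_ofList]
      rw [hB]
      congr 1
      omega
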